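-- pv_equiv track=rewrite | github.com/duckdb/duckdb | tools/juliapkg/scripts/generate_c_api.py | get_extension_api_version
-- ===== SOURCE A (Python) =====
-- def get_extension_api_version(ext_api_definitions):
--     latest_version = ""
--
--     for version_entry in ext_api_definitions:
--         if version_entry["version"].startswith("v"):
--             latest_version = version_entry["version"]
--         if version_entry["version"].startswith("unstable_"):
--             break
--
--     return latest_version
-- ===== SOURCE B (Python) =====
-- def _cut_at_unstable(ext_api_definitions):
--     """Index one past the first unstable entry (len if there is none)."""
--     for i, entry in enumerate(ext_api_definitions):
--         if entry["version"].startswith("unstable_"):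
--             return i + 1
--     return len(ext_api_definitions)
--
--
-- def get_extension_api_version(ext_api_definitions):
--     # pass 1: cut the entry list just after the first unstable entry
--     prefix = ext_api_definitions[:_cut_at_unstable(ext_api_definitions)]
--     versions = [entry["version"] for entry in prefix]
--     # pass 2: last version starting with 'v' in that prefix, '' if none
--     return next((v for v in reversed(versions) if v.startswith("v")), "")
-- ===== Notes on version B (the rewrite author's own statement) =====
-- stated objective: simpler
-- what changed: A's single fused loop with a mutable latest_version and a break is replaced by a cut-then-last-match decomposition: extract the versions, slice off the prefix before the first unstable_ entry, then take the last version starting with 'v' via next over reversed.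
import Mathlib
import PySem

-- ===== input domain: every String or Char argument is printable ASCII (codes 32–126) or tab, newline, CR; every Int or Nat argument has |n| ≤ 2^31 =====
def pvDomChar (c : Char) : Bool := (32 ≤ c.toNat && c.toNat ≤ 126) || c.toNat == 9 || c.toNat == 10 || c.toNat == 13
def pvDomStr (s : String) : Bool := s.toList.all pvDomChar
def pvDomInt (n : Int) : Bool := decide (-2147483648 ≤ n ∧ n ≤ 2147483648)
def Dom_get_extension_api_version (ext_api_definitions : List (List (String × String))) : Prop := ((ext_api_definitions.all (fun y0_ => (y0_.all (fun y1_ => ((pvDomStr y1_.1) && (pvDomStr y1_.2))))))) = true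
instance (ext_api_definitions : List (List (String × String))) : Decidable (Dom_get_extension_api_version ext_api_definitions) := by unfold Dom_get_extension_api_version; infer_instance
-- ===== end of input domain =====

-- B replaces A's fused loop-with-break by a cut-then-last-match decomposition (prefix up to the
-- first unstable entry, then the last 'v…' version in it); same O(n) cost, objective: simpler.

-- ===== PORT A =====
-- the entry's "version" value (total form; Pre_ guarantees the key is present wherever it is read)
def pvVersion (e : List (String × String)) : String :=
  PySem.Dict.getD (PySem.Dict.ofList e) "version" ""

-- the for-loop with its mutable latest_version and break, as structural recursion
def pvALoop : List (List (String × String)) → String → String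
  | [], latest_version => latest_version
  | e :: rest, latest_version =>
    let v := pvVersion e
    let latest_version' := if PySem.Str.startswith v "v" then v else latest_version
    if PySem.Str.startswith v "unstable_" then latest_version'
    else pvALoop rest latest_version'

def get_extension_api_version (ext_api_definitions : List (List (String × String))) : String :=
  pvALoop ext_api_definitions ""

-- ===== PORT B =====
-- _cut_at_unstable: index one past the first unstable entry (len if none)
def pvCutAtUnstable : List (List (String × String)) → Nat
  | [] => 0
  | e :: rest =>
    if PySem.Str.startswith (pvVersion e) "unstable_" then 1
    else pvCutAtUnstable rest + 1

def get_extension_api_version_alt (ext_api_definitions : List (List (String × String))) : String :=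
  let prefx := ext_api_definitions.take (pvCutAtUnstable ext_api_definitions)
  let versions := prefx.map pvVersion
  ((versions.reverse).find? (fun v => PySem.Str.startswith v "v")).getD ""

-- ===== PRECONDITION & SPEC =====
-- Pre_ excludes exactly the inputs where A raises KeyError: an entry without the key "version"
-- that A's loop reaches, i.e. one preceded only by keyed, non-unstable entries.
def Pre_get_extension_api_version (ext_api_definitions : List (List (String × String))) : Prop :=
  ∀ i < ext_api_definitions.length,
    (∀ j < i, (PySem.Dict.ofList (ext_api_definitions.getD j [])).contains "version" = true ∧
       PySem.Str.startswith (pvVersion (ext_api_definitions.getD j [])) "unstable_" = false) →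
    (PySem.Dict.ofList (ext_api_definitions.getD i [])).contains "version" = true
instance (ext_api_definitions : List (List (String × String))) : Decidable (Pre_get_extension_api_version ext_api_definitions) := by unfold Pre_get_extension_api_version; infer_instance

def pvWitness_get_extension_api_version : (List (List (String × String))) :=
  [[("version", "v1")], [("version", "unstable_foo")], [("other", "x")]]

def Spec_get_extension_api_version (ext_api_definitions : List (List (String × String))) (out : String) : Prop := out = get_extension_api_version_alt ext_api_definitions
instance (ext_api_definitions : List (List (String × String))) (out : String) : Decidable (Spec_get_extension_api_version ext_api_definitions out) := by unfold Spec_get_extension_api_version; infer_instance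

-- ===== CLAIM (what is proved, stated in full; the proofs are below) =====
def Claim_equal_get_extension_api_version : Prop := ∀ (ext_api_definitions : List (List (String × String))), Dom_get_extension_api_version ext_api_definitions → Pre_get_extension_api_version ext_api_definitions → Spec_get_extension_api_version ext_api_definitions (get_extension_api_version ext_api_definitions)

-- ===== LEMMAS AND PROOFS =====

-- a version starting with "unstable_" cannot start with "v"
lemma unstable_not_v (s : String) (h : PySem.Str.startswith s "unstable_" = true) :
    PySem.Str.startswith s "v" = false := by
  by_contra hv
  rw [Bool.not_eq_false] at hv
  simp only [PySem.Str.startswith_eq] at h hv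
  rw [PySem.Chars.startswith_iff] at h hv
  obtain ⟨t1, e1⟩ := h
  obtain ⟨t2, e2⟩ := hv
  rw [← e1] at e2
  have : "v".toList = ['v'] := by decide
  rw [this] at e2
  have : "unstable_".toList = ['u','n','s','t','a','b','l','e','_'] := by decide
  rw [this] at e2
  simp at e2

lemma aLoop_eq (l : List (List (String × String))) :
    ∀ latest, pvALoop l latest =
      ((((l.take (pvCutAtUnstable l)).map pvVersion).reverse).find?
        (fun v => PySem.Str.startswith v "v")).getD latest := by
  induction l with
  | nil => intro latest; simp [pvALoop, pvCutAtUnstable]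
  | cons e rest ih =>
    intro latest
    by_cases hu : PySem.Str.startswith (pvVersion e) "unstable_" = true
    · have hv := unstable_not_v _ hu
      simp [pvALoop, pvCutAtUnstable, hu, hv,
        -PySem.Str.startswith_eq, -List.map_take]
    · rw [Bool.not_eq_true] at hu
      simp only [pvALoop, pvCutAtUnstable, hu, Bool.false_eq_true, if_false,
        List.take_succ_cons, List.map_cons, List.reverse_cons, List.find?_append]
      rw [ih]
      cases hfind : (((rest.take (pvCutAtUnstable rest)).map pvVersion).reverse).find?
          (fun v => PySem.Str.startswith v "v") with
      | none =>
        by_cases hv : PySem.Str.startswith (pvVersion e) "v" = true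
        · simp [hv, -PySem.Str.startswith_eq, -List.map_take]
        · rw [Bool.not_eq_true] at hv
          simp [hv, -PySem.Str.startswith_eq, -List.map_take]
      | some w => simp [-PySem.Str.startswith_eq, -List.map_take]

-- ===== VERDICT (by name: the statement is the Claim_ definition above) =====
theorem get_extension_api_version_spec : Claim_equal_get_extension_api_version := by
  intro l _ _
  unfold Spec_get_extension_api_version get_extension_api_version get_extension_api_version_alt
  exact aLoop_eq l ""
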